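-- pv_equiv track=rewrite | github.com/cchoooots98/marketplace-analytics-platform | ingestion/utils/bigquery_client.py | _normalize_table_id
-- ===== SOURCE A (Python) =====
-- def _normalize_table_id(table_id: str) -> str:
--     """Validate and normalize a BigQuery destination table ID."""
--     if not isinstance(table_id, str):
--         msg = "table_id must be a string"
--         raise TypeError(msg)
--
--     normalized_table_id = table_id.strip()
--     table_parts = normalized_table_id.split(".")
--
--     if len(table_parts) not in {2, 3} or any(not part for part in table_parts):
--         msg = "table_id must use dataset.table or project.dataset.table format"
--         raise ValueError(msg)
--
--     return normalized_table_id
-- ===== SOURCE B (Python) =====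
-- def _normalize_table_id(table_id: str) -> str:
--     """Validate and normalize a BigQuery destination table ID."""
--     if not isinstance(table_id, str):
--         msg = "table_id must be a string"
--         raise TypeError(msg)
--
--     normalized = table_id.strip()
--     dots = normalized.count(".")
--
--     if (
--         dots not in (1, 2)
--         or ".." in normalized
--         or normalized.startswith(".")
--         or normalized.endswith(".")
--     ):
--         msg = "table_id must use dataset.table or project.dataset.table format"
--         raise ValueError(msg)
--
--     return normalized
-- ===== Notes on version B (the rewrite author's own statement) =====
-- stated objective: simpler
-- what changed: B drops the split-into-parts pass entirely and validates the stripped string directly: the dot count must be 1 or 2 and no two dots may be adjacent and no dot may sit at either end, which characterises exactly the valid 2- or 3-part ids with non-empty parts.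
import Mathlib
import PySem

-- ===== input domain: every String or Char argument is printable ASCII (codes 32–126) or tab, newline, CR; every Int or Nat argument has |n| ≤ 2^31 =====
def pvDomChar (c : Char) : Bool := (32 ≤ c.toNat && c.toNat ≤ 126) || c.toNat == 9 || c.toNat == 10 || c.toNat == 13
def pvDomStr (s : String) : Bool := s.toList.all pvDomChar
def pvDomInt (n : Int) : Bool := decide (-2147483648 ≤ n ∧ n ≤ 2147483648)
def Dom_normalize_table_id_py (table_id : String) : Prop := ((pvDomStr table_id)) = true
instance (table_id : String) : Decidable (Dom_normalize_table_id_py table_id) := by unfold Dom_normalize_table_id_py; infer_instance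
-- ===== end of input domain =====

-- B replaces split-into-parts validation by direct string checks (dot count + no adjacent/boundary dots); objective: simpler.
-- On invalid table ids both programs raise ValueError (TypeError is unreachable for str input): those inputs are outside Pre_.

-- ===== PORT A =====
def normalize_table_id_py (table_id : String) : String :=
  -- the isinstance/TypeError branch cannot fire: table_id is a str
  let normalized_table_id := PySem.Chars.strip table_id.toList
  let table_parts := PySem.Chars.splitOn normalized_table_id ['.']
  if !(table_parts.length == 2 || table_parts.length == 3) || table_parts.any (fun part => part.isEmpty)
  then ""  -- raise ValueError: excluded by Pre_normalize_table_id_py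
  else String.ofList normalized_table_id

-- ===== PORT B =====
def normalize_table_id_py_alt (table_id : String) : String :=
  -- the isinstance/TypeError branch cannot fire: table_id is a str
  let normalized := PySem.Chars.strip table_id.toList
  let dots := PySem.Chars.count normalized ['.']
  if !(dots == 1 || dots == 2) || PySem.Chars.isIn ['.', '.'] normalized
      || PySem.Chars.startswith normalized ['.'] || PySem.Chars.endswith normalized ['.']
  then ""  -- raise ValueError: excluded by Pre_normalize_table_id_py
  else String.ofList normalized

-- ===== PRECONDITION & SPEC =====
-- Pre_ holds exactly when A returns (otherwise A raises ValueError: wrong number of '.'-separated parts or an empty part).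
def Pre_normalize_table_id_py (table_id : String) : Prop :=
  ((PySem.Chars.splitOn (PySem.Chars.strip table_id.toList) ['.']).length = 2 ∨
   (PySem.Chars.splitOn (PySem.Chars.strip table_id.toList) ['.']).length = 3) ∧
  ∀ p ∈ PySem.Chars.splitOn (PySem.Chars.strip table_id.toList) ['.'], p ≠ []
instance (table_id : String) : Decidable (Pre_normalize_table_id_py table_id) := by
  unfold Pre_normalize_table_id_py; infer_instance
def pvWitness_normalize_table_id_py : String := "proj.data.tbl"

def Spec_normalize_table_id_py (table_id : String) (out : String) : Prop := out = normalize_table_id_py_alt table_id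
instance (table_id : String) (out : String) : Decidable (Spec_normalize_table_id_py table_id out) := by unfold Spec_normalize_table_id_py; infer_instance

-- ===== CLAIM (what is proved, stated in full; the proofs are below) =====
def Claim_equal_normalize_table_id_py : Prop := ∀ (table_id : String), Dom_normalize_table_id_py table_id → Pre_normalize_table_id_py table_id → Spec_normalize_table_id_py table_id (normalize_table_id_py table_id)

-- ===== LEMMAS AND PROOFS =====

-- proof-side model of str.split(".") on a stripped string
def pvSplit : List Char → List (List Char)
  | [] => [[]]
  | c :: rest => if c = '.' then [] :: pvSplit rest else (pvSplit rest).modifyHead (c :: ·)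

theorem pvSplit_ne_nil (l : List Char) : pvSplit l ≠ [] := by
  induction l with
  | nil => simp [pvSplit]
  | cons c rest ih =>
    simp only [pvSplit]
    split
    · simp
    · cases h : pvSplit rest with
      | nil => exact absurd h ih
      | cons a t => simp

theorem pvSplit_cons_headI_tail (l : List Char) : (pvSplit l).headI :: (pvSplit l).tail = pvSplit l := by
  cases h : pvSplit l with
  | nil => exact absurd h (pvSplit_ne_nil l)
  | cons a t => simp

theorem go_eq_pvSplit : ∀ (fuel : Nat) (l cur : List Char) (acc : List (List Char)),
    l.length < fuel →
    PySem.Chars.splitOn.go ['.'] fuel l cur acc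
      = acc.reverse ++ (cur.reverse ++ (pvSplit l).headI) :: (pvSplit l).tail := by
  intro fuel
  induction fuel with
  | zero => intro l cur acc h; omega
  | succ fuel ih =>
    intro l cur acc h
    cases l with
    | nil => simp [PySem.Chars.splitOn.go, pvSplit]
    | cons c rest =>
      by_cases hc : c = '.'
      · subst hc
        rw [PySem.Chars.splitOn.go]
        simp only [List.isPrefixOf, BEq.rfl, Bool.true_and, List.isPrefixOf_nil_left, if_true,
          List.length_cons, List.drop_succ_cons, List.length_nil, List.drop_zero]
        rw [ih rest [] ((cur.reverse :: acc)) (by simpa using Nat.lt_of_succ_lt_succ h)]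
        rw [show pvSplit ('.' :: rest) = [] :: pvSplit rest from by simp [pvSplit]]
        obtain ⟨a, t, hps⟩ : ∃ a t, pvSplit rest = a :: t := by
          cases h' : pvSplit rest with
          | nil => exact absurd h' (pvSplit_ne_nil rest)
          | cons a t => exact ⟨a, t, rfl⟩
        simp [hps]
      · rw [PySem.Chars.splitOn.go]
        have hpre : (['.'].isPrefixOf (c :: rest)) = false := by
          simp [List.isPrefixOf]; exact fun h => absurd h.symm hc
        rw [if_neg (by simp [hpre])]
        rw [ih rest (c :: cur) acc (by simpa using Nat.lt_of_succ_lt_succ h)]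
        rw [show pvSplit (c :: rest) = (pvSplit rest).modifyHead (c :: ·) from by simp [pvSplit, hc]]
        obtain ⟨a, t, hps⟩ : ∃ a t, pvSplit rest = a :: t := by
          cases h' : pvSplit rest with
          | nil => exact absurd h' (pvSplit_ne_nil rest)
          | cons a t => exact ⟨a, t, rfl⟩
        simp [hps]

theorem splitOn_eq_pvSplit (l : List Char) : PySem.Chars.splitOn l ['.'] = pvSplit l := by
  unfold PySem.Chars.splitOn
  rw [go_eq_pvSplit (l.length + 1) l [] [] (by omega)]
  simpa using pvSplit_cons_headI_tail l

theorem length_pvSplit (l : List Char) : (pvSplit l).length = l.count '.' + 1 := by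
  induction l with
  | nil => simp [pvSplit]
  | cons c rest ih =>
    by_cases hc : c = '.'
    · subst hc; simp [pvSplit, ih, List.count_cons]
    · simp [pvSplit, hc, ih, List.count_cons, Ne.symm hc]

theorem count_go_dot : ∀ (fuel : Nat) (l : List Char) (acc : Nat), l.length ≤ fuel →
    PySem.Chars.count.go ['.'] fuel l acc = acc + l.count '.' := by
  intro fuel
  induction fuel with
  | zero =>
    intro l acc h
    have : l = [] := List.length_eq_zero_iff.mp (Nat.le_zero.mp h)
    subst this; simp [PySem.Chars.count.go]
  | succ fuel ih =>
    intro l acc h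
    cases l with
    | nil => simp [PySem.Chars.count.go]
    | cons c rest =>
      by_cases hc : c = '.'
      · subst hc
        rw [PySem.Chars.count.go]
        simp only [List.isPrefixOf, BEq.rfl, Bool.true_and, List.isPrefixOf_nil_left, if_true,
          List.length_cons, List.drop_succ_cons, List.length_nil, List.drop_zero]
        rw [ih rest (acc + 1) (by simpa using Nat.le_of_succ_le_succ h)]
        simp [List.count_cons]; omega
      · rw [PySem.Chars.count.go]
        have hpre : (['.'].isPrefixOf (c :: rest)) = false := by
          simp [List.isPrefixOf]; exact fun h => absurd h.symm hc
        rw [if_neg (by simp [hpre])]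
        rw [ih rest acc (by simpa using Nat.le_of_succ_le_succ h)]
        simp [List.count_cons, hc]

theorem count_dot_eq (l : List Char) : PySem.Chars.count l ['.'] = l.count '.' := by
  unfold PySem.Chars.count
  rw [if_neg (by simp)]
  simpa using count_go_dot l.length l 0 (le_refl _)

theorem mem_nil_tail_of_infix : ∀ (l : List Char), ['.', '.'] <:+: l → [] ∈ (pvSplit l).tail := by
  intro l
  induction l with
  | nil => intro h; simp at h
  | cons c rest ih =>
    intro h
    rcases List.infix_cons_iff.mp h with hp | hi
    · obtain ⟨t, ht⟩ := hp
      injection ht with h1 h2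
      subst h2
      have hc : c = '.' := h1.symm
      subst hc
      simp [pvSplit]
    · by_cases hc : c = '.'
      · subst hc
        simp only [pvSplit, if_pos rfl, List.tail_cons]
        exact List.mem_of_mem_tail (ih hi)
      · simp only [pvSplit, if_neg hc]
        rw [← pvSplit_cons_headI_tail rest]
        simpa using ih hi

theorem mem_nil_tail_of_suffix : ∀ (l : List Char), ['.'] <:+ l → [] ∈ (pvSplit l).tail := by
  intro l
  induction l with
  | nil => intro h; have := List.suffix_nil.mp h; simp at this
  | cons c rest ih =>
    intro h
    rcases List.suffix_cons_iff.mp h with he | hs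
    · injection he with h1 h2
      subst h2
      have hc : c = '.' := h1.symm
      subst hc
      simp [pvSplit]
    · by_cases hc : c = '.'
      · subst hc
        simp only [pvSplit, if_pos rfl, List.tail_cons]
        exact List.mem_of_mem_tail (ih hs)
      · simp only [pvSplit, if_neg hc]
        rw [← pvSplit_cons_headI_tail rest]
        simpa using ih hs

theorem mem_nil_of_prefix (l : List Char) (h : ['.'] <+: l) : [] ∈ pvSplit l := by
  obtain ⟨t, ht⟩ := h
  subst ht
  simp [pvSplit]

-- ===== VERDICT (by name: the statement is the Claim_ definition above) =====
theorem normalize_table_id_py_spec : Claim_equal_normalize_table_id_py := by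
  intro table_id _ hpre
  unfold Spec_normalize_table_id_py normalize_table_id_py normalize_table_id_py_alt
  obtain ⟨hlen, hne⟩ := hpre
  rw [splitOn_eq_pvSplit] at hlen hne
  -- A's guard is false
  have hA : (!((pvSplit (PySem.Chars.strip table_id.toList)).length == 2 ||
        (pvSplit (PySem.Chars.strip table_id.toList)).length == 3) ||
        (pvSplit (PySem.Chars.strip table_id.toList)).any (fun part => part.isEmpty)) = false := by
    simp only [Bool.or_eq_false_iff, Bool.not_eq_eq_eq_not, Bool.not_false, List.any_eq_false]
    constructor
    · rcases hlen with h | h <;> simp [h]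
    · intro p hp
      simpa [List.isEmpty_iff] using hne p hp
  -- B's guard is false
  have hcount : PySem.Chars.count (PySem.Chars.strip table_id.toList) ['.'] = 1 ∨
      PySem.Chars.count (PySem.Chars.strip table_id.toList) ['.'] = 2 := by
    have := length_pvSplit (PySem.Chars.strip table_id.toList)
    rw [count_dot_eq]
    omega
  have hnin : PySem.Chars.isIn ['.', '.'] (PySem.Chars.strip table_id.toList) = false := by
    rw [PySem.Chars.isIn_eq_false_iff]
    intro hinf
    exact hne [] (List.mem_of_mem_tail (mem_nil_tail_of_infix _ hinf)) rfl
  have hst : PySem.Chars.startswith (PySem.Chars.strip table_id.toList) ['.'] = false := by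
    rw [← Bool.not_eq_true, PySem.Chars.startswith_iff]
    intro hp
    exact hne [] (mem_nil_of_prefix _ hp) rfl
  have hen : PySem.Chars.endswith (PySem.Chars.strip table_id.toList) ['.'] = false := by
    rw [← Bool.not_eq_true, PySem.Chars.endswith_iff]
    intro hs
    exact hne [] (List.mem_of_mem_tail (mem_nil_tail_of_suffix _ hs)) rfl
  simp only [splitOn_eq_pvSplit, hA, hcount, hnin, hst, hen]
  rcases hcount with h | h <;> simp [h]
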